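-- pv_equiv track=rewrite | github.com/sunilkumarc/100 | Max-j-i-In-Array/prog.py | findMaxji
-- ===== SOURCE A (Python) =====
-- def findMaxji(arr, N):
--     LMin = []
--     LMax = []
--     minimum = arr[0]
--     LMin.append(minimum)
--     for i in range(1, N):
--         minimum = min(minimum, arr[i])
--         LMin.append(minimum)
--
--     maximum = arr[N-1]
--     LMax.append(maximum)
--     for j in range(N-2, -1, -1):
--         maximum = max(maximum, arr[j])
--         LMax.append(maximum)
--     LMax.reverse()
--
--     i = j = 0
--     maxji = -1
--     while i < N and j < N:
--         if LMin[i] < LMax[j]: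
--             maxji = max(maxji, j-i)
--             j += 1
--         else:
--             i += 1
--
--     return maxji
-- ===== SOURCE B (Python) =====
-- def findMaxji(arr, N):
--     maxji = -1
--     for i in range(N):
--         for j in range(i + 1, N):
--             if arr[j] > arr[i]:
--                 maxji = max(maxji, j - i)
--     return maxji
-- ===== Notes on version B (the rewrite author's own statement) =====
-- stated objective: simpler
-- what changed: Replaced the prefix-min/suffix-max arrays and the two-pointer scan by a direct brute-force search over all index pairs i<j with arr[j]>arr[i], keeping the running maximum of j-i.
import Mathlib
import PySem

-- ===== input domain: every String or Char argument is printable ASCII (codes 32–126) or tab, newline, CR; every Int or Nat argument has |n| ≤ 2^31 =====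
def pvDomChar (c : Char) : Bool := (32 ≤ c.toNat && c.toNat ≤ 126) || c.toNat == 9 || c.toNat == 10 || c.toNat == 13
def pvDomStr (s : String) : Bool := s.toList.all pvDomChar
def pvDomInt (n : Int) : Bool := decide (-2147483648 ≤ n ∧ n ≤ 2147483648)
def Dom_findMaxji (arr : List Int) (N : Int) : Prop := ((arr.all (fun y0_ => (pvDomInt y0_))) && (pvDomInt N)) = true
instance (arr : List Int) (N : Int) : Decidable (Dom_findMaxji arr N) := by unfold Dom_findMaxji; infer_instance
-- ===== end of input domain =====

-- B replaces A's prefix-min/suffix-max arrays + two-pointer scan by a plain brute-force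
-- search over all pairs i<j with arr[j]>arr[i] (simpler, no auxiliary arrays; not faster).


-- ===== PORT A =====
-- the 'while i < N and j < N' loop of A (terminates because (N-i)+(N-j) shrinks)
def findMaxjiLoop (LMin LMax : List Int) (N i j maxji : Int) : Int :=
  if _h : i < N ∧ j < N then
    if PySem.List.pyGetD LMin i 0 < PySem.List.pyGetD LMax j 0 then
      findMaxjiLoop LMin LMax N i (j + 1) (max maxji (j - i))
    else
      findMaxjiLoop LMin LMax N (i + 1) j maxji
  else maxji
termination_by ((N - i).toNat + (N - j).toNat)
decreasing_by all_goals omega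

def findMaxji (arr : List Int) (N : Int) : Int :=
  let minimum0 := PySem.List.pyGetD arr 0 0
  let stMin := (PySem.List.pyRange 1 N 1).foldl
      (fun (st : List Int × Int) i =>
        let m := min st.2 (PySem.List.pyGetD arr i 0)
        (st.1 ++ [m], m)) ([minimum0], minimum0)
  let LMin := stMin.1
  let maximum0 := PySem.List.pyGetD arr (N - 1) 0
  let stMax := (PySem.List.pyRange (N - 2) (-1) (-1)).foldl
      (fun (st : List Int × Int) j =>
        let m := max st.2 (PySem.List.pyGetD arr j 0)
        (st.1 ++ [m], m)) ([maximum0], maximum0)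
  let LMax := stMax.1.reverse
  findMaxjiLoop LMin LMax N 0 0 (-1)

-- ===== PORT B =====
def findMaxji_alt (arr : List Int) (N : Int) : Int :=
  (PySem.List.pyRange 0 N 1).foldl
    (fun m i =>
      (PySem.List.pyRange (i + 1) N 1).foldl
        (fun m j =>
          if PySem.List.pyGetD arr i 0 < PySem.List.pyGetD arr j 0 then max m (j - i) else m)
        m)
    (-1)

-- ===== PRECONDITION & SPEC =====
-- Pre_ excludes exactly the inputs on which A raises IndexError (arr[0], arr[i] for i < N, arr[N-1]).
def Pre_findMaxji (arr : List Int) (N : Int) : Prop :=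
  arr ≠ [] ∧ 1 - (arr.length : Int) ≤ N ∧ N ≤ (arr.length : Int)
instance (arr : List Int) (N : Int) : Decidable (Pre_findMaxji arr N) := by
  unfold Pre_findMaxji; infer_instance

def pvWitness_findMaxji : List Int × Int := ([3, 1, 4, 2], 4)

def Spec_findMaxji (arr : List Int) (N : Int) (out : Int) : Prop := out = findMaxji_alt arr N
instance (arr : List Int) (N : Int) (out : Int) : Decidable (Spec_findMaxji arr N out) := by
  unfold Spec_findMaxji; infer_instance

-- ===== CLAIM (what is proved, stated in full; the proofs are below) =====
def Claim_equal_findMaxji : Prop := ∀ (arr : List Int) (N : Int), Dom_findMaxji arr N → Pre_findMaxji arr N → Spec_findMaxji arr N (findMaxji arr N)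

-- ===== LEMMAS AND PROOFS =====

-- prefix minimum of arr[0..k]
def pmin (arr : List Int) : Nat → Int
  | 0 => arr.getD 0 0
  | k + 1 => min (pmin arr k) (arr.getD (k + 1) 0)

-- suffix maximum of arr[N-1-k..N-1]
def smax (arr : List Int) (N : Int) : Nat → Int
  | 0 => PySem.List.pyGetD arr (N - 1) 0
  | k + 1 => max (smax arr N k) (PySem.List.pyGetD arr (N - 1 - ((k : Int) + 1)) 0)

-- ---- generic facts about guarded running-max folds ----
theorem gmax_ge {α : Type} (c : α → Prop) [DecidablePred c] (v : α → Int)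
    (l : List α) (m : Int) :
    m ≤ l.foldl (fun m x => if c x then max m (v x) else m) m := by
  induction l generalizing m with
  | nil => simp
  | cons x t ih =>
      simp only [List.foldl_cons]
      split_ifs
      · exact le_trans (le_max_left _ _) (ih _)
      · exact ih m

theorem gmax_ub {α : Type} (c : α → Prop) [DecidablePred c] (v : α → Int)
    (l : List α) (m : Int) (x : α) (hx : x ∈ l) (hc : c x) :
    v x ≤ l.foldl (fun m x => if c x then max m (v x) else m) m := by
  induction l generalizing m with
  | nil => cases hx
  | cons y t ih =>
      simp only [List.foldl_cons]
      rcases List.mem_cons.mp hx with h | h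
      · subst h
        have h1 : v x ≤ max m (v x) := le_max_right _ _
        simp only [if_pos hc]
        exact le_trans h1 (gmax_ge c v t _)
      · exact ih _ h

theorem gmax_attain {α : Type} (c : α → Prop) [DecidablePred c] (v : α → Int)
    (l : List α) (m : Int) :
    l.foldl (fun m x => if c x then max m (v x) else m) m = m ∨
      ∃ x ∈ l, c x ∧ l.foldl (fun m x => if c x then max m (v x) else m) m = v x := by
  induction l generalizing m with
  | nil => simp
  | cons x t ih =>
      simp only [List.foldl_cons]
      split_ifs with hc
      · rcases ih (max m (v x)) with h | ⟨y, hy, hcy, hv⟩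
        · rw [h]
          rcases max_choice m (v x) with h2 | h2
          · exact Or.inl h2
          · exact Or.inr ⟨x, List.mem_cons_self .., hc, h2⟩
        · exact Or.inr ⟨y, List.mem_cons_of_mem _ hy, hcy, hv⟩
      · rcases ih m with h | ⟨y, hy, hcy, hv⟩
        · exact Or.inl h
        · exact Or.inr ⟨y, List.mem_cons_of_mem _ hy, hcy, hv⟩

-- pyGetD at a non-negative Int index is getD at the corresponding Nat index
theorem pyGetD_toNat (xs : List Int) (i : Int) (h : 0 ≤ i) :
    PySem.List.pyGetD xs i 0 = xs.getD i.toNat 0 := by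
  have h2 := PySem.List.pyGetD_natCast (xs := xs) (n := i.toNat) (d := 0)
  rwa [Int.toNat_of_nonneg h] at h2

-- ---- facts about pmin / smax ----
theorem pmin_le (arr : List Int) (k k' : Nat) (h : k' ≤ k) :
    pmin arr k ≤ arr.getD k' 0 := by
  induction k with
  | zero => interval_cases k'; simp [pmin]
  | succ k ih =>
      by_cases h2 : k' ≤ k
      · exact le_trans (min_le_left _ _) (ih h2)
      · have h3 : k' = k + 1 := by omega
        subst h3; exact min_le_right _ _

theorem pmin_attain (arr : List Int) (k : Nat) :
    ∃ k' ≤ k, pmin arr k = arr.getD k' 0 := by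
  induction k with
  | zero => exact ⟨0, le_rfl, rfl⟩
  | succ k ih =>
      rcases min_choice (pmin arr k) (arr.getD (k + 1) 0) with h | h
      · obtain ⟨k', hk', he⟩ := ih
        exact ⟨k', Nat.le_succ_of_le hk', by rw [pmin, h, he]⟩
      · exact ⟨k + 1, le_rfl, by rw [pmin, h]⟩

theorem smax_ub (arr : List Int) (N : Int) (k : Nat) (j' : Int)
    (h1 : N - 1 - k ≤ j') (h2 : j' ≤ N - 1) :
    PySem.List.pyGetD arr j' 0 ≤ smax arr N k := by
  induction k with
  | zero =>
      have : j' = N - 1 := by push_cast at h1; omega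
      subst this; simp [smax]
  | succ k ih =>
      by_cases h : N - 1 - k ≤ j'
      · exact le_trans (ih h) (le_max_left _ _)
      · have hj : j' = N - 1 - ((k : Int) + 1) := by push_cast at h1; omega
        rw [hj, smax]
        exact le_max_right _ _

theorem smax_attain (arr : List Int) (N : Int) (k : Nat) :
    ∃ j' : Int, N - 1 - k ≤ j' ∧ j' ≤ N - 1 ∧ smax arr N k = PySem.List.pyGetD arr j' 0 := by
  induction k with
  | zero => exact ⟨N - 1, by simp, le_rfl, rfl⟩
  | succ k ih =>
      rcases max_choice (smax arr N k) (PySem.List.pyGetD arr (N - 1 - ((k : Int) + 1)) 0) with h | h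
      · obtain ⟨j', hj1, hj2, he⟩ := ih
        refine ⟨j', by push_cast at hj1 ⊢; omega, hj2, by rw [smax, h, he]⟩
      · exact ⟨N - 1 - ((k : Int) + 1), by push_cast; omega, by push_cast; omega, by rw [smax, h]⟩

theorem smax_mono (arr : List Int) (N : Int) (k k2 : Nat) (h : k ≤ k2) :
    smax arr N k ≤ smax arr N k2 := by
  induction k2 with
  | zero => interval_cases k; exact le_rfl
  | succ k2 ih =>
      by_cases h2 : k ≤ k2
      · exact le_trans (ih h2) (le_max_left _ _)
      · have h3 : k = k2 + 1 := by omega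
        subst h3; exact le_rfl

-- ---- generic outer-fold facts ----
theorem foldl_ge {α : Type} (l : List α) (g : Int → α → Int)
    (hg : ∀ m x, m ≤ g m x) : ∀ m, m ≤ l.foldl g m := by
  induction l with
  | nil => intro m; simp
  | cons x t ih => intro m; exact le_trans (hg m x) (ih (g m x))

theorem foldl_attain {α : Type} (l : List α) (g : Int → α → Int) (Q : α → Int → Prop)
    (hg : ∀ m x, g m x = m ∨ Q x (g m x)) :
    ∀ m, l.foldl g m = m ∨ ∃ x ∈ l, Q x (l.foldl g m) := by
  induction l with
  | nil => intro m; exact Or.inl rfl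
  | cons x t ih =>
      intro m
      simp only [List.foldl_cons]
      rcases ih (g m x) with h | ⟨y, hy, hQ⟩
      · rw [h]
        rcases hg m x with h2 | h2
        · exact Or.inl h2
        · exact Or.inr ⟨x, List.mem_cons_self .., h2⟩
      · exact Or.inr ⟨y, List.mem_cons_of_mem _ hy, hQ⟩

-- ---- facts about B's value ----
theorem alt_lb (arr : List Int) (N : Int) : -1 ≤ findMaxji_alt arr N := by
  unfold findMaxji_alt
  apply foldl_ge
  intro m i
  exact gmax_ge (fun j => PySem.List.pyGetD arr i 0 < PySem.List.pyGetD arr j 0)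
    (fun j => j - i) _ m

theorem alt_ub (arr : List Int) (N : Int) (i j : Int) (h0 : 0 ≤ i) (hij : i < j) (hjN : j < N)
    (hlt : PySem.List.pyGetD arr i 0 < PySem.List.pyGetD arr j 0) :
    j - i ≤ findMaxji_alt arr N := by
  have hiN : i < N := lt_trans hij hjN
  have hsplit : PySem.List.pyRange 0 N 1 = PySem.List.pyRange 0 i 1 ++ PySem.List.pyRange i N 1 :=
    PySem.List.pyRange_one_append 0 i N h0 (le_of_lt hiN)
  have hcons : PySem.List.pyRange i N 1 = i :: PySem.List.pyRange (i + 1) N 1 :=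
    PySem.List.pyRange_one_cons hiN
  unfold findMaxji_alt
  rw [hsplit, hcons, List.foldl_append, List.foldl_cons]
  have hjmem : j ∈ PySem.List.pyRange (i + 1) N 1 := by
    rw [PySem.List.mem_pyRange_one]; omega
  refine le_trans ?_ (foldl_ge _ _ (fun m i' => gmax_ge (fun j' => PySem.List.pyGetD arr i' 0 < PySem.List.pyGetD arr j' 0) (fun j' => j' - i') _ m) _)
  exact gmax_ub (fun j' => PySem.List.pyGetD arr i 0 < PySem.List.pyGetD arr j' 0)
    (fun j' => j' - i) _ _ j hjmem hlt

theorem alt_attain (arr : List Int) (N : Int) :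
    findMaxji_alt arr N = -1 ∨
      ∃ i j : Int, 0 ≤ i ∧ i < j ∧ j < N ∧
        PySem.List.pyGetD arr i 0 < PySem.List.pyGetD arr j 0 ∧ findMaxji_alt arr N = j - i := by
  unfold findMaxji_alt
  have h := foldl_attain (PySem.List.pyRange 0 N 1)
    (fun m i => (PySem.List.pyRange (i + 1) N 1).foldl
        (fun m j => if PySem.List.pyGetD arr i 0 < PySem.List.pyGetD arr j 0 then max m (j - i) else m) m)
    (fun i r => ∃ j : Int, i < j ∧ j < N ∧
        PySem.List.pyGetD arr i 0 < PySem.List.pyGetD arr j 0 ∧ r = j - i)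
    ?_ (-1)
  · rcases h with h | ⟨i, hi, j, hij, hjN, hlt, he⟩
    · exact Or.inl h
    · have h0 : 0 ≤ i := ((PySem.List.mem_pyRange_one).mp hi).1
      exact Or.inr ⟨i, j, h0, hij, hjN, hlt, he⟩
  · intro m i
    rcases gmax_attain (fun j => PySem.List.pyGetD arr i 0 < PySem.List.pyGetD arr j 0)
      (fun j => j - i) (PySem.List.pyRange (i + 1) N 1) m with h | ⟨j, hj, hc, he⟩
    · exact Or.inl h
    · have hb := (PySem.List.mem_pyRange_one).mp hj
      exact Or.inr ⟨j, by omega, hb.2, hc, he⟩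

-- every pair with prefix-min(i) < suffix-max(j) is dominated by B's value
theorem spair_le (arr : List Int) (N : Int) (i j : Int)
    (h0i : 0 ≤ i) (_h0j : 0 ≤ j) (_hiN : i < N) (hjN : j < N)
    (h : pmin arr i.toNat < smax arr N ((N - 1 - j).toNat)) :
    j - i ≤ findMaxji_alt arr N := by
  obtain ⟨k', hk', hpe⟩ := pmin_attain arr i.toNat
  obtain ⟨j', hj'1, hj'2, hse⟩ := smax_attain arr N ((N - 1 - j).toNat)
  have hjj' : j ≤ j' := by omega
  have hval : arr.getD k' 0 < PySem.List.pyGetD arr j' 0 := by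
    rw [← hpe, ← hse]; exact h
  by_cases hneg : j - i ≤ -1
  · have hb := alt_lb arr N; linarith
  · have hIi : (k' : Int) ≤ i := by omega
    have hIj' : (k' : Int) ≤ j' := by omega
    have hIval : PySem.List.pyGetD arr (k' : Int) 0 < PySem.List.pyGetD arr j' 0 := by
      rwa [pyGetD_toNat arr (k' : Int) (by omega), Int.toNat_natCast]
    have hne : (k' : Int) < j' := by
      rcases lt_or_eq_of_le hIj' with h2 | h2
      · exact h2
      · exfalso
        rw [← h2, pyGetD_toNat arr (k' : Int) (by omega), Int.toNat_natCast] at hval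
        exact lt_irrefl _ hval
    have := alt_ub arr N (k' : Int) j' (by omega) hne (by omega) hIval
    linarith

-- ---- the two fold loops of A build the pmin / smax tables ----
theorem LMin_fold (arr : List Int) (k : Nat) :
    (PySem.List.pyRange 1 ((k : Int) + 1) 1).foldl
      (fun (st : List Int × Int) i =>
        let m := min st.2 (PySem.List.pyGetD arr i 0)
        (st.1 ++ [m], m)) ([pmin arr 0], pmin arr 0)
    = ((List.range (k + 1)).map (pmin arr), pmin arr k) := by
  induction k with
  | zero =>
      rw [PySem.List.pyRange_one_eq_nil (by norm_num)]
      simp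
  | succ k ih =>
      have hsr : PySem.List.pyRange 1 (((k + 1 : Nat) : Int) + 1) 1
          = PySem.List.pyRange 1 ((k : Int) + 1) 1 ++ [(k : Int) + 1] := by
        push_cast
        exact PySem.List.pyRange_one_succ_right (by omega)
      rw [hsr, List.foldl_append, ih, List.foldl_cons, List.foldl_nil]
      have hidx : PySem.List.pyGetD arr ((k : Int) + 1) 0 = arr.getD (k + 1) 0 := by
        have h2 := PySem.List.pyGetD_natCast (xs := arr) (n := k + 1) (d := (0 : Int))
        rwa [Nat.cast_add, Nat.cast_one] at h2
      show (List.map (pmin arr) (List.range (k + 1)) ++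
              [min (pmin arr k) (PySem.List.pyGetD arr ((k : Int) + 1) 0)],
            min (pmin arr k) (PySem.List.pyGetD arr ((k : Int) + 1) 0))
          = (List.map (pmin arr) (List.range (k + 1 + 1)), pmin arr (k + 1))
      rw [hidx]
      have hp : min (pmin arr k) (arr.getD (k + 1) 0) = pmin arr (k + 1) := rfl
      rw [hp]
      conv_rhs => rw [List.range_succ]
      simp

theorem LMax_fold (arr : List Int) (N : Int) :
    ∀ (d k : Nat) (acc : List Int), (k : Int) + d = N - 1 →
    (PySem.List.pyRange (N - 2 - k) (-1) (-1)).foldl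
      (fun (st : List Int × Int) j =>
        let m := max st.2 (PySem.List.pyGetD arr j 0)
        (st.1 ++ [m], m)) (acc, smax arr N k)
    = (acc ++ (List.range d).map (fun t => smax arr N (k + 1 + t)), smax arr N (k + d)) := by
  intro d
  induction d with
  | zero =>
      intro k acc hk
      rw [PySem.List.pyRange_neg_one_eq_nil (by omega)]
      simp
  | succ d ih =>
      intro k acc hk
      rw [PySem.List.pyRange_neg_one_cons (by omega), List.foldl_cons]
      have hstep : max (smax arr N k) (PySem.List.pyGetD arr (N - 2 - k) 0) = smax arr N (k + 1) := by
        rw [smax]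
        have : N - 1 - ((k : Int) + 1) = N - 2 - k := by ring
        rw [this]
      simp only [hstep]
      have harg : N - 2 - (k : Int) - 1 = N - 2 - ((k + 1 : Nat) : Int) := by push_cast; ring
      rw [harg, ih (k + 1) (acc ++ [smax arr N (k + 1)]) (by push_cast; omega)]
      rw [Prod.mk.injEq]
      refine ⟨?_, by congr 1 ; omega⟩
      rw [List.append_assoc]
      congr 1
      rw [List.range_succ_eq_map]
      simp only [List.map_cons, List.map_map, List.singleton_append]
      rw [List.cons.injEq]
      refine ⟨by congr 1, ?_⟩
      apply List.map_congr_left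
      intro t _
      congr 1
      omega

-- ---- A's while loop computes B's value ----
theorem loop_eq (arr : List Int) (N : Int) (LMin LMax : List Int)
    (hLMin : ∀ i : Int, 0 ≤ i → i < N → PySem.List.pyGetD LMin i 0 = pmin arr i.toNat)
    (hLMax : ∀ j : Int, 0 ≤ j → j < N → PySem.List.pyGetD LMax j 0 = smax arr N ((N - 1 - j).toNat))
    (hlen : N ≤ (arr.length : Int))
    (i j m : Int) (hi0 : 0 ≤ i) (hj0 : 0 ≤ j) (hiN : i ≤ N) (hjN : j ≤ N)
    (hm1 : -1 ≤ m) (hmb : m ≤ findMaxji_alt arr N)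
    (hcov : ∀ i0 j0 : Int, 0 ≤ i0 → 0 ≤ j0 → i0 < N → j0 < N → (i0 < i ∨ j0 < j) →
       pmin arr i0.toNat < smax arr N ((N - 1 - j0).toNat) → j0 - i0 ≤ m) :
    findMaxjiLoop LMin LMax N i j m = findMaxji_alt arr N := by
  rw [findMaxjiLoop]
  split_ifs with h1 h2
  · -- LMin[i] < LMax[j] : record j - i, advance j
    rw [hLMin i hi0 h1.1, hLMax j hj0 h1.2] at h2
    refine loop_eq arr N LMin LMax hLMin hLMax hlen i (j + 1) (max m (j - i))
      hi0 (by omega) hiN (by omega)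
      (le_trans hm1 (le_max_left _ _))
      (max_le hmb (spair_le arr N i j hi0 hj0 h1.1 h1.2 h2)) ?_
    intro i0 j0 h0i h0j hi0N hj0N hcase hS
    by_cases hold : i0 < i ∨ j0 < j
    · exact le_trans (hcov i0 j0 h0i h0j hi0N hj0N hold hS) (le_max_left _ _)
    · have hj0j : j0 = j := by omega
      have hii0 : i ≤ i0 := by omega
      have := le_max_right m (j - i)
      omega
  · -- LMin[i] ≥ LMax[j] : advance i
    rw [hLMin i hi0 h1.1, hLMax j hj0 h1.2] at h2
    refine loop_eq arr N LMin LMax hLMin hLMax hlen (i + 1) j m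
      (by omega) hj0 (by omega) hjN hm1 hmb ?_
    intro i0 j0 h0i h0j hi0N hj0N hcase hS
    by_cases hold : i0 < i ∨ j0 < j
    · exact hcov i0 j0 h0i h0j hi0N hj0N hold hS
    · exfalso
      have hi0i : i0 = i := by omega
      have hjj0 : j ≤ j0 := by omega
      have hmono : smax arr N ((N - 1 - j0).toNat) ≤ smax arr N ((N - 1 - j).toNat) :=
        smax_mono arr N _ _ (by omega)
      rw [hi0i] at hS
      exact absurd (lt_of_lt_of_le hS hmono) h2
  · -- loop over: i = N or j = N, every candidate pair is covered
    have hend : i = N ∨ j = N := by omega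
    refine le_antisymm hmb ?_
    rcases alt_attain arr N with h | ⟨i0, j0, h0i, hij0, hj0N, hlt, he⟩
    · rw [h] at hmb ⊢; exact hm1
    · rw [he]
      have h0j : 0 ≤ j0 := by omega
      have hi0N : i0 < N := lt_trans hij0 hj0N
      have hplow : pmin arr i0.toNat ≤ PySem.List.pyGetD arr i0 0 := by
        rw [pyGetD_toNat arr i0 h0i]
        exact pmin_le arr i0.toNat i0.toNat le_rfl
      have hshigh : PySem.List.pyGetD arr j0 0 ≤ smax arr N ((N - 1 - j0).toNat) :=
        smax_ub arr N ((N - 1 - j0).toNat) j0 (by omega) (by omega)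
      exact hcov i0 j0 h0i h0j hi0N hj0N (by omega)
        (lt_of_le_of_lt hplow (lt_of_lt_of_le hlt hshigh))
termination_by ((N - i).toNat + (N - j).toNat)
decreasing_by all_goals omega

-- generic reshaping of the LMax table
theorem cons_map_shift (f : Nat → Int) (n : Nat) (hn : 1 ≤ n) :
    f 0 :: (List.range (n - 1)).map (fun t => f (1 + t)) = (List.range n).map f := by
  conv_rhs => rw [← Nat.sub_add_cancel hn, List.range_succ_eq_map]
  simp only [List.map_cons, List.map_map]
  rw [List.cons.injEq]
  exact ⟨rfl, List.map_congr_left (fun t _ => by congr 1 ; omega)⟩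

-- ===== VERDICT (by name: the statement is the Claim_ definition above) =====
theorem findMaxji_spec : Claim_equal_findMaxji := by
  unfold Claim_equal_findMaxji Spec_findMaxji
  intro arr N _dom hpre
  obtain ⟨hne, hlo, hhi⟩ := hpre
  by_cases hN : N ≤ 0
  · -- no loop iterations on either side
    have hA : findMaxji arr N = findMaxjiLoop _ _ N 0 0 (-1) := rfl
    rw [hA, findMaxjiLoop, dif_neg (by omega)]
    unfold findMaxji_alt
    rw [PySem.List.pyRange_one_eq_nil (by omega)]
    rfl
  · have hN1 : 1 ≤ N := by omega
    have hlen0 : arr.length ≠ 0 := fun h => hne (List.eq_nil_of_length_eq_zero h)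
    set n : Nat := N.toNat with hn
    have hnN : (n : Int) = N := Int.toNat_of_nonneg (by omega)
    have hn1 : 1 ≤ n := by omega
    have hnlen : n ≤ arr.length := by omega
    -- A unfolded (the lets are definitional)
    have hA : findMaxji arr N = findMaxjiLoop
        ((PySem.List.pyRange 1 N 1).foldl
          (fun (st : List Int × Int) i =>
            let m := min st.2 (PySem.List.pyGetD arr i 0)
            (st.1 ++ [m], m)) ([PySem.List.pyGetD arr 0 0], PySem.List.pyGetD arr 0 0)).1
        (((PySem.List.pyRange (N - 2) (-1) (-1)).foldl
          (fun (st : List Int × Int) j =>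
            let m := max st.2 (PySem.List.pyGetD arr j 0)
            (st.1 ++ [m], m)) ([PySem.List.pyGetD arr (N - 1) 0], PySem.List.pyGetD arr (N - 1) 0)).1.reverse)
        N 0 0 (-1) := rfl
    -- the LMin table
    have hinit : PySem.List.pyGetD arr 0 0 = pmin arr 0 := by
      rw [PySem.List.pyGetD_zero]; rfl
    have hLMin1 : (PySem.List.pyRange 1 N 1).foldl
          (fun (st : List Int × Int) i =>
            let m := min st.2 (PySem.List.pyGetD arr i 0)
            (st.1 ++ [m], m)) ([PySem.List.pyGetD arr 0 0], PySem.List.pyGetD arr 0 0)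
        = ((List.range n).map (pmin arr), pmin arr (n - 1)) := by
      rw [hinit]
      have hNcast : N = ((n - 1 : Nat) : Int) + 1 := by omega
      rw [hNcast, LMin_fold arr (n - 1), Nat.sub_add_cancel hn1]
    -- the LMax table
    have hinit2 : ([PySem.List.pyGetD arr (N - 1) 0], PySem.List.pyGetD arr (N - 1) 0)
        = ([smax arr N 0], smax arr N 0) := rfl
    have hLMax1 : (PySem.List.pyRange (N - 2) (-1) (-1)).foldl
          (fun (st : List Int × Int) j =>
            let m := max st.2 (PySem.List.pyGetD arr j 0)
            (st.1 ++ [m], m)) ([PySem.List.pyGetD arr (N - 1) 0], PySem.List.pyGetD arr (N - 1) 0)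
        = ((List.range n).map (smax arr N), smax arr N (n - 1)) := by
      rw [hinit2]
      have harg : N - 2 = N - 2 - ((0 : Nat) : Int) := by push_cast; ring
      rw [harg, LMax_fold arr N (n - 1) 0 [smax arr N 0] (by push_cast; omega)]
      rw [Prod.mk.injEq]
      refine ⟨?_, by simp⟩
      · show smax arr N 0 :: (List.range (n - 1)).map (fun t => smax arr N (0 + 1 + t))
            = (List.range n).map (smax arr N)
        simp only [Nat.zero_add]
        exact cons_map_shift (smax arr N) n hn1
    rw [hA, hLMin1, hLMax1]
    -- index into the tables
    have hLMinIdx : ∀ i : Int, 0 ≤ i → i < N →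
        PySem.List.pyGetD ((List.range n).map (pmin arr)) i 0 = pmin arr i.toNat := by
      intro i h0 hiN
      rw [pyGetD_toNat _ i h0]
      have hlt : i.toNat < ((List.range n).map (pmin arr)).length := by
        simp; omega
      rw [List.getD_eq_getElem _ _ hlt]
      simp
    have hLMaxIdx : ∀ j : Int, 0 ≤ j → j < N →
        PySem.List.pyGetD (((List.range n).map (smax arr N)).reverse) j 0
          = smax arr N ((N - 1 - j).toNat) := by
      intro j h0 hjN
      rw [pyGetD_toNat _ j h0]
      have hlt : j.toNat < (((List.range n).map (smax arr N)).reverse).length := by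
        simp; omega
      rw [List.getD_eq_getElem _ _ hlt]
      rw [List.getElem_reverse]
      simp only [List.getElem_map, List.getElem_range]
      congr 1
      simp only [List.length_map, List.length_range]
      omega
    exact loop_eq arr N _ _ hLMinIdx hLMaxIdx hhi 0 0 (-1)
      le_rfl le_rfl (by omega) (by omega) le_rfl (alt_lb arr N)
      (fun i0 j0 h0i h0j _ _ hcase _ => absurd hcase (by omega))
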